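-- pv_equiv track=rewrite | github.com/JakubDotPy/aoc2020 | day06/part1.py | compute
-- ===== SOURCE A (Python) =====
-- def compute(s: str) -> int:
--     lengths = []
--     for group in s.split('\n\n'):
--         group_set = set()
--         for person_answ in group.split('\n'):
--             group_set.update(set(person_answ))
--         lengths.append(len(group_set))
--     return sum(lengths)
-- ===== SOURCE B (Python) =====
-- def compute(s: str) -> int:
--     # Single left-to-right character scan: maintain the current group's seen-set
--     # and whether the previous character was a newline; flush on a blank line.
--     total = 0
--     seen = set()
--     prev_nl = False
--     for c in s:
--         if c == '\n':
--             if prev_nl: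
--                 total += len(seen)
--                 seen = set()
--                 prev_nl = False
--             else:
--                 prev_nl = True
--         else:
--             seen.add(c)
--             prev_nl = False
--     return total + len(seen)
-- ===== Notes on version B (the rewrite author's own statement) =====
-- stated objective: alternative
-- what changed: Replaces the two-level split (on '\n\n', then per person on '\n') with a single left-to-right character scan that keeps one running seen-set and a previous-was-newline flag, flushing the count at each blank line; no splitting or per-person set unions.
import Mathlib
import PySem

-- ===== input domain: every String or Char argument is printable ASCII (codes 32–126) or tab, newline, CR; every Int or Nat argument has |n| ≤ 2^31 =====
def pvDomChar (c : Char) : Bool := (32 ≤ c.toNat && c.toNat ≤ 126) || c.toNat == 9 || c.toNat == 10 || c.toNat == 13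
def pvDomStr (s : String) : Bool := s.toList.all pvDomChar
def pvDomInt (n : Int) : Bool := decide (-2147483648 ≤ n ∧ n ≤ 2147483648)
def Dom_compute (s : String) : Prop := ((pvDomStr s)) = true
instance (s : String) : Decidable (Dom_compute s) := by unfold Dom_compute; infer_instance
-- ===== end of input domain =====

-- B replaces A's split-on-"\n\n" / split-on-"\n" / per-person set unions by a single
-- left-to-right character scan with a running seen-set and a blank-line flush (objective: alternative).

-- ===== PORT A =====
-- A: for each group (split on "\n\n"), union per-person character sets, append the size; sum.
def compute (s : String) : Int :=
  let lengths : List Int :=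
    (PySem.Chars.splitOn s.toList ['\n', '\n']).foldl
      (fun lengths group =>
        let groupSet : PySem.Set Char :=
          (PySem.Chars.splitOn group ['\n']).foldl
            (fun st person => PySem.Set.update st (PySem.Set.ofList person))
            PySem.Set.empty
        lengths ++ [(PySem.Set.len groupSet : Int)])
      []
  lengths.sum

-- ===== PORT B =====
-- B: one pass over the characters; state = (running total, current group's seen-set, previous-char-was-newline flag).
def computeAltGo : List Char → Int → PySem.Set Char → Bool → Int
  | [], total, seen, _ => total + PySem.Set.len seen
  | c :: rest, total, seen, prevNl =>
    if c = '\n' then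
      if prevNl then computeAltGo rest (total + PySem.Set.len seen) PySem.Set.empty false
      else computeAltGo rest total seen true
    else computeAltGo rest total (PySem.Set.add seen c) false

def compute_alt (s : String) : Int :=
  computeAltGo s.toList 0 PySem.Set.empty false

-- ===== PRECONDITION & SPEC =====
def Spec_compute (s : String) (out : Int) : Prop := out = compute_alt s
instance (s : String) (out : Int) : Decidable (Spec_compute s out) := by unfold Spec_compute; infer_instance

-- ===== CLAIM (what is proved, stated in full; the proofs are below) =====
def Claim_equal_compute : Prop := ∀ (s : String), Dom_compute s → Spec_compute s (compute s)

-- ===== LEMMAS AND PROOFS =====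

-- ---- A-side: each group's unioned set has the size of the group's non-newline character set ----

-- flatten of splitOn.go on the single-char separator '\n', with enough fuel
lemma go_flatten : ∀ (fuel : Nat) (l : List Char), l.length ≤ fuel →
    ∀ (cur : List Char) (acc : List (List Char)),
    (PySem.Chars.splitOn.go ['\n'] fuel l cur acc).flatten
      = acc.reverse.flatten ++ cur.reverse ++ l.filter (fun c => c != '\n') := by
  intro fuel
  induction fuel with
  | zero =>
    intro l hl cur acc
    have : l = [] := List.eq_nil_of_length_eq_zero (Nat.le_zero.mp hl)
    subst this
    simp [PySem.Chars.splitOn.go]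
  | succ n ih =>
    intro l hl cur acc
    cases l with
    | nil => simp [PySem.Chars.splitOn.go]
    | cons c rest =>
      by_cases hc : c = '\n'
      · subst hc
        have hpre : List.isPrefixOf ['\n'] ('\n' :: rest) = true := by
          simp [List.isPrefixOf]
        rw [PySem.Chars.splitOn.go]
        simp only [hpre, if_true]
        rw [show List.drop (['\n'] : List Char).length ('\n' :: rest) = rest from rfl]
        rw [ih rest (by simpa using Nat.le_of_succ_le_succ hl)]
        simp
      · have hpre : List.isPrefixOf ['\n'] (c :: rest) = false := by
          simp [List.isPrefixOf, Ne.symm hc]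
        rw [PySem.Chars.splitOn.go]
        simp only [hpre, Bool.false_eq_true, if_false]
        rw [ih rest (by simpa using Nat.le_of_succ_le_succ hl)]
        simp [hc]

lemma splitOn_flatten (g : List Char) :
    (PySem.Chars.splitOn g ['\n']).flatten = g.filter (fun c => c != '\n') := by
  have := go_flatten (g.length + 1) g (by omega) [] []
  simpa [PySem.Chars.splitOn] using this

lemma mem_foldl_update (pieces : List (List Char)) (st : PySem.Set Char) (y : Char) :
    y ∈ pieces.foldl (fun st p => PySem.Set.update st (PySem.Set.ofList p)) st
      ↔ y ∈ st ∨ ∃ p ∈ pieces, y ∈ p := by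
  induction pieces generalizing st with
  | nil => simp
  | cons p ps ih =>
    simp only [List.foldl_cons, ih, PySem.Set.mem_update, PySem.Set.mem_ofList,
      List.mem_cons]
    constructor
    · rintro ((h | h) | ⟨q, hq, hy⟩)
      · exact Or.inl h
      · exact Or.inr ⟨p, Or.inl rfl, h⟩
      · exact Or.inr ⟨q, Or.inr hq, hy⟩
    · rintro (h | ⟨q, (rfl | hq), hy⟩)
      · exact Or.inl (Or.inl h)
      · exact Or.inl (Or.inr hy)
      · exact Or.inr ⟨q, hq, hy⟩

lemma nodup_foldl_update (pieces : List (List Char)) (st : PySem.Set Char)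
    (h : st.Nodup) :
    (pieces.foldl (fun st p => PySem.Set.update st (PySem.Set.ofList p)) st).Nodup := by
  induction pieces generalizing st with
  | nil => exact h
  | cons p ps ih => exact ih _ (PySem.Set.nodup_update _ _ h)

-- B's per-group count (whole-block distinct chars minus newline), as used on the A side
def grpF (g : List Char) : Int :=
  PySem.Set.len (PySem.Set.diff (PySem.Set.ofList g) (PySem.Set.ofList ['\n']))

-- per-group: A's unioned set has the same size as the whole-block set minus newline
lemma group_len (g : List Char) :
    (PySem.Set.len
      ((PySem.Chars.splitOn g ['\n']).foldl
        (fun st person => PySem.Set.update st (PySem.Set.ofList person))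
        PySem.Set.empty) : Int)
    = grpF g := by
  have hA : ((PySem.Chars.splitOn g ['\n']).foldl
      (fun st person => PySem.Set.update st (PySem.Set.ofList person))
      PySem.Set.empty).Nodup :=
    nodup_foldl_update _ _ (by simp [PySem.Set.empty])
  have hB : (PySem.Set.diff (PySem.Set.ofList g) (PySem.Set.ofList ['\n'])).Nodup :=
    PySem.Set.nodup_diff _ _ (PySem.Set.nodup_ofList g)
  have hmem : ∀ y : Char,
      (y ∈ (PySem.Chars.splitOn g ['\n']).foldl
        (fun st person => PySem.Set.update st (PySem.Set.ofList person))
        PySem.Set.empty)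
      ↔ y ∈ PySem.Set.diff (PySem.Set.ofList g) (PySem.Set.ofList ['\n']) := by
    intro y
    rw [mem_foldl_update, PySem.Set.mem_diff]
    have : (∃ p ∈ PySem.Chars.splitOn g ['\n'], y ∈ p)
        ↔ y ∈ (PySem.Chars.splitOn g ['\n']).flatten := by
      simp [List.mem_flatten]
    rw [this, splitOn_flatten]
    simp [PySem.Set.mem_ofList, PySem.Set.empty, List.mem_filter]
  have hperm := (List.perm_ext_iff_of_nodup hA hB).mpr hmem
  simpa [grpF, PySem.Set.len, PySem.Set.empty] using hperm.length_eq

-- A reduced: sum of grpF over the groups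
lemma compute_eq_sum (s : String) :
    compute s = ((PySem.Chars.splitOn s.toList ['\n', '\n']).map grpF).sum := by
  unfold compute
  rw [PySem.List.foldl_append_singleton_eq_map]
  simp only [List.nil_append]
  exact congrArg List.sum (List.map_congr_left (fun g _ => group_len g))

-- ---- splitOn on "\n\n", characterized as a simple recursion ----

def splitNN : List Char → List (List Char)
  | [] => [[]]
  | '\n' :: '\n' :: r => [] :: splitNN r
  | c :: r =>
    match splitNN r with
    | [] => [[c]]
    | g :: gs => (c :: g) :: gs


lemma splitNN_cons_of (c : Char) (r : List Char)
    (h : ∀ r1, c = '\n' → r = '\n' :: r1 → False)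
    (g : List Char) (gs : List (List Char)) (hr : splitNN r = g :: gs) :
    splitNN (c :: r) = (c :: g) :: gs := by
  rw [splitNN.eq_def]
  split
  · simp_all
  · rename_i r1 heq
    injection heq with h1 h2
    exact (h r1 h1 h2).elim
  · rename_i c' r' hne heq
    injection heq with h1 h2
    subst h1; subst h2
    rw [hr]

lemma splitNN_ne_nil (l : List Char) : splitNN l ≠ [] := by
  induction l using splitNN.induct with
  | case1 => simp [splitNN]
  | case2 r ih => simp [splitNN]
  | case3 c r h hnil ih => exact absurd hnil ih
  | case4 c r h g gs hr ih => simp [splitNN_cons_of c r h g gs hr]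

lemma go_eq_splitNN : ∀ (fuel : Nat) (l : List Char), l.length < fuel →
    ∀ (cur : List Char) (acc : List (List Char)),
    PySem.Chars.splitOn.go ['\n', '\n'] fuel l cur acc
      = acc.reverse ++
        (match splitNN l with
         | [] => [cur.reverse]
         | g :: gs => (cur.reverse ++ g) :: gs) := by
  intro fuel
  induction fuel with
  | zero => intro l hl; omega
  | succ n ih =>
    intro l hl cur acc
    cases l with
    | nil => simp [PySem.Chars.splitOn.go, splitNN]
    | cons c rest =>
      by_cases hpre : List.isPrefixOf ['\n', '\n'] (c :: rest) = true
      · obtain ⟨rfl, r2, rfl⟩ :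
            c = '\n' ∧ ∃ r2, rest = '\n' :: r2 := by
          cases rest with
          | nil => simp [List.isPrefixOf] at hpre
          | cons d r2 =>
            simp [List.isPrefixOf] at hpre
            exact ⟨hpre.1.symm, r2, by rw [hpre.2]⟩
        rw [PySem.Chars.splitOn.go]
        simp only [hpre, if_true]
        rw [show List.drop (['\n', '\n'] : List Char).length ('\n' :: '\n' :: r2) = r2 from rfl]
        rw [ih r2 (by simp at hl ⊢; omega) [] (cur.reverse :: acc)]
        cases hg : splitNN r2 with
        | nil => exact absurd hg (splitNN_ne_nil r2)
        | cons g gs =>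
          rw [show splitNN ('\n' :: '\n' :: r2) = [] :: splitNN r2 from rfl, hg]
          simp
      · have hpre' : List.isPrefixOf ['\n', '\n'] (c :: rest) = false :=
          eq_false_of_ne_true hpre
        rw [PySem.Chars.splitOn.go]
        simp only [hpre', Bool.false_eq_true, if_false]
        rw [ih rest (by simp at hl ⊢; omega) (c :: cur) acc]
        have hns : ∀ r1, c = '\n' → rest = '\n' :: r1 → False := by
          intro r1 hc hr
          subst hc; subst hr
          simp [List.isPrefixOf] at hpre
        cases hg : splitNN rest with
        | nil => exact absurd hg (splitNN_ne_nil rest)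
        | cons g gs =>
          rw [splitNN_cons_of c rest hns g gs hg]
          simp

lemma splitOn_eq_splitNN (l : List Char) :
    PySem.Chars.splitOn l ['\n', '\n'] = splitNN l := by
  rw [PySem.Chars.splitOn, go_eq_splitNN (l.length + 1) l (by omega) [] []]
  cases hg : splitNN l with
  | nil => exact absurd hg (splitNN_ne_nil l)
  | cons g gs => simp

-- ---- B-side invariant ----

def lenU (seen : PySem.Set Char) (g : List Char) : Int :=
  PySem.Set.len (PySem.Set.update seen (g.filter (fun c => c != '\n')))

def groupsVal (seen : PySem.Set Char) : List (List Char) → Int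
  | [] => PySem.Set.len seen
  | g :: gs => lenU seen g + (gs.map grpF).sum

lemma lenU_nil (seen : PySem.Set Char) : lenU seen [] = PySem.Set.len seen := rfl

lemma lenU_cons (seen : PySem.Set Char) (c : Char) (g : List Char) (hc : c ≠ '\n') :
    lenU seen (c :: g) = lenU (PySem.Set.add seen c) g := by
  unfold lenU
  rw [show (c :: g).filter (fun c => c != '\n') = c :: g.filter (fun c => c != '\n') by
    simp [hc]]
  rfl

lemma lenU_cons_nl (seen : PySem.Set Char) (g : List Char) :
    lenU seen ('\n' :: g) = lenU seen g := by
  unfold lenU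
  rw [show ('\n' :: g).filter (fun c => c != '\n') = g.filter (fun c => c != '\n') by
    simp]

lemma lenU_empty (g : List Char) : lenU PySem.Set.empty g = grpF g := by
  have hA : (PySem.Set.update PySem.Set.empty (g.filter (fun c => c != '\n'))).Nodup :=
    PySem.Set.nodup_update _ _ (by simp [PySem.Set.empty])
  have hB : (PySem.Set.diff (PySem.Set.ofList g) (PySem.Set.ofList ['\n'])).Nodup :=
    PySem.Set.nodup_diff _ _ (PySem.Set.nodup_ofList g)
  have hmem : ∀ y : Char,
      y ∈ PySem.Set.update PySem.Set.empty (g.filter (fun c => c != '\n'))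
      ↔ y ∈ PySem.Set.diff (PySem.Set.ofList g) (PySem.Set.ofList ['\n']) := by
    intro y
    rw [PySem.Set.mem_update, PySem.Set.mem_diff]
    simp [PySem.Set.mem_ofList, PySem.Set.empty, List.mem_filter]
  have hperm := (List.perm_ext_iff_of_nodup hA hB).mpr hmem
  simpa [lenU, grpF, PySem.Set.len] using hperm.length_eq

lemma groupsVal_empty (gs : List (List Char)) (h : gs ≠ []) :
    groupsVal PySem.Set.empty gs = (gs.map grpF).sum := by
  cases gs with
  | nil => exact absurd rfl h
  | cons g rest => simp only [groupsVal, List.map_cons, List.sum_cons, lenU_empty]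

-- from the prev-newline state, a list not starting with '\n' scans like the clean state
lemma scan_true_eq_false (l : List Char) (h : ∀ r1, l = '\n' :: r1 → False)
    (total : Int) (seen : PySem.Set Char) :
    computeAltGo l total seen true = computeAltGo l total seen false := by
  cases l with
  | nil => rfl
  | cons c rest =>
    have hc : c ≠ '\n' := fun hc => h rest (by rw [hc])
    simp [computeAltGo, hc]

-- the scan invariant: from a clean state, the scanner adds the grouped counts
lemma scan_val : ∀ (l : List Char) (total : Int) (seen : PySem.Set Char),
    seen.Nodup → '\n' ∉ seen →
    computeAltGo l total seen false = total + groupsVal seen (splitNN l) := by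
  intro l
  induction l using splitNN.induct with
  | case1 =>
    intro total seen _ _
    simp [computeAltGo, splitNN, groupsVal, lenU_nil]
  | case2 r ih =>
    intro total seen hnd hnl
    rw [show computeAltGo ('\n' :: '\n' :: r) total seen false
        = computeAltGo r (total + PySem.Set.len seen) PySem.Set.empty false from by
      simp [computeAltGo]]
    rw [ih _ _ (by simp [PySem.Set.empty]) (by simp [PySem.Set.empty])]
    rw [show splitNN ('\n' :: '\n' :: r) = [] :: splitNN r from rfl]
    cases hg : splitNN r with
    | nil => exact absurd hg (splitNN_ne_nil r)
    | cons g gs =>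
      rw [groupsVal_empty _ (by simp)]
      simp [groupsVal, lenU_nil]
      ring
  | case3 c r h hnil ih => exact absurd hnil (splitNN_ne_nil r)
  | case4 c r h g gs hr ih =>
    intro total seen hnd hnl
    rw [splitNN_cons_of c r h g gs hr]
    by_cases hc : c = '\n'
    · subst hc
      have hr' : ∀ r1, r = '\n' :: r1 → False := fun r1 hr1 => h r1 rfl hr1
      rw [show computeAltGo ('\n' :: r) total seen false
          = computeAltGo r total seen true from by simp [computeAltGo]]
      rw [scan_true_eq_false r hr' total seen, ih total seen hnd hnl, hr]
      simp [groupsVal, lenU_cons_nl]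
    · rw [show computeAltGo (c :: r) total seen false
          = computeAltGo r total (PySem.Set.add seen c) false from by
        simp [computeAltGo, hc]]
      rw [ih total _ (PySem.Set.nodup_add seen c hnd)
        (by rw [PySem.Set.mem_add]; rintro (h1 | h2); exact hnl h1; exact hc h2.symm), hr]
      simp [groupsVal, lenU_cons seen c g hc]

-- ===== VERDICT (by name: the statement is the Claim_ definition above) =====
theorem compute_spec : Claim_equal_compute := by
  intro s _
  unfold Spec_compute
  rw [compute_eq_sum]
  unfold compute_alt
  rw [scan_val s.toList 0 PySem.Set.empty (by simp [PySem.Set.empty]) (by simp [PySem.Set.empty])]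
  rw [splitOn_eq_splitNN]
  rw [groupsVal_empty _ (splitNN_ne_nil _)]
  ring
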